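-- pv_equiv track=rewrite | github.com/m-ciesielski/GGA | kd_tree/kd_tree.py | split_points_list
-- ===== SOURCE A (Python) =====
-- def split_points_list(points_x: list, points_y: list, split_axis: int):
--     assert split_axis == 0 or split_axis == 1
--     if split_axis == 0:
--         other_axis = 1
--     else:
--         other_axis = 0
--
--     points_sorted_by_split_axis = [points_x, points_y][split_axis]
--     points_sorted_by_other_axis = [points_x, points_y][other_axis]
--     median = len(points_sorted_by_split_axis) // 2
--     splitting_point = points_sorted_by_split_axis[median]
--     splitting_line = splitting_point[split_axis]
--     left_axis_points, right_axis_points = points_sorted_by_split_axis[:median], points_sorted_by_split_axis[median:]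
--     left_other_points = [p for p in points_sorted_by_other_axis if p[split_axis] < splitting_point[split_axis]
--                          or (p[split_axis] == splitting_point[split_axis]
--                              and p[other_axis] < splitting_point[other_axis])]
--     right_other_points = [p for p in points_sorted_by_other_axis if p[split_axis] > splitting_point[split_axis]
--                           or (p[split_axis] == splitting_point[split_axis]
--                               and p[other_axis] >= splitting_point[other_axis])]
--
--     return splitting_line, left_axis_points, right_axis_points, left_other_points, right_other_points
-- ===== SOURCE B (Python) =====
-- def split_points_list(points_x: list, points_y: list, split_axis: int):
--     assert split_axis == 0 or split_axis == 1
--     other_axis = 1 - split_axis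
--     src = (points_x, points_y)[split_axis]
--     oth = (points_x, points_y)[other_axis]
--     median = len(src) // 2
--     sp = src[median]
--     key = (sp[split_axis], sp[other_axis])
--     # stable sort by the boolean "belongs to the right side": all left points come
--     # first (in original order), then all right points; split the sorted list at
--     # the number of left points.
--     ordered = sorted(oth, key=lambda p: (p[split_axis], p[other_axis]) >= key)
--     n_left = sum((p[split_axis], p[other_axis]) < key for p in oth)
--     return key[0], src[:median], src[median:], ordered[:n_left], ordered[n_left:]
-- ===== Notes on version B (the rewrite author's own statement) =====
-- stated objective: alternative
-- what changed: The two complementary filter comprehensions are replaced by a stable sort of the other-axis list on the boolean key 'belongs right of the splitting point', which groups the left points before the right points in original order, followed by a count of left points and a single slice split.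
import Mathlib
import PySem

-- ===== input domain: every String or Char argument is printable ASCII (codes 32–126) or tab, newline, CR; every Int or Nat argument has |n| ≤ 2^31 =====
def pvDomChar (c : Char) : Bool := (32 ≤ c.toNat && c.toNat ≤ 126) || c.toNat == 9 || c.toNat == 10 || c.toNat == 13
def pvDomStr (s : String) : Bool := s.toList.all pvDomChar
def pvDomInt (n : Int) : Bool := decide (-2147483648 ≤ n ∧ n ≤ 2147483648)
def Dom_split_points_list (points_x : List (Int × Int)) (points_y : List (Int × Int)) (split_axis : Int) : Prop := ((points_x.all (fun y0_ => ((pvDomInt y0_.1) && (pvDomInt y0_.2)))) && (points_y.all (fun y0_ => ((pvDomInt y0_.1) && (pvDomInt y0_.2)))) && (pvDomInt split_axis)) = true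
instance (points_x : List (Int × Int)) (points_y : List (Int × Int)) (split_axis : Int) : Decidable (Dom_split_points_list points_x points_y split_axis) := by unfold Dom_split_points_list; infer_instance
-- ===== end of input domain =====

-- B replaces A's two complementary filter passes by a stable sort of the other-axis list on
-- the boolean key "belongs right of the splitting point" followed by one slice split
-- (objective: alternative; same return values).

-- p[ax] for a 2-tuple; exact for ax ∈ {0,1}, which the assert guarantees under Pre_
def pvCoord (p : Int × Int) (ax : Int) : Int := if ax = 0 then p.1 else p.2

-- ===== PORT A =====
def split_points_list (points_x : List (Int × Int)) (points_y : List (Int × Int)) (split_axis : Int) : Int × (List (Int × Int)) × (List (Int × Int)) × (List (Int × Int)) × (List (Int × Int)) :=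
  let other_axis : Int := if split_axis = 0 then 1 else 0
  -- [points_x, points_y][split_axis]: exact for split_axis ∈ {0,1} (assert)
  let s := if split_axis = 0 then points_x else points_y
  let o := if other_axis = 0 then points_x else points_y
  let median : Nat := s.length / 2          -- len(...) // 2 on a nonnegative length
  match s[median]? with
  | none => (0, [], [], [], [])             -- IndexError on an empty list: excluded by Pre_
  | some sp =>
    let splitting_line := pvCoord sp split_axis
    let left_axis := s.take median          -- s[:median], exact: 0 ≤ median ≤ len s
    let right_axis := s.drop median         -- s[median:]
    let left_other := o.filter (fun p =>
      decide (pvCoord p split_axis < pvCoord sp split_axis) ||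
      (pvCoord p split_axis == pvCoord sp split_axis &&
        decide (pvCoord p other_axis < pvCoord sp other_axis)))
    let right_other := o.filter (fun p =>
      decide (pvCoord p split_axis > pvCoord sp split_axis) ||
      (pvCoord p split_axis == pvCoord sp split_axis &&
        decide (pvCoord p other_axis ≥ pvCoord sp other_axis)))
    (splitting_line, left_axis, right_axis, left_other, right_other)

-- ===== PORT B =====
def split_points_list_alt (points_x : List (Int × Int)) (points_y : List (Int × Int)) (split_axis : Int) : Int × (List (Int × Int)) × (List (Int × Int)) × (List (Int × Int)) × (List (Int × Int)) :=
  let other_axis : Int := 1 - split_axis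
  let src := if split_axis = 0 then points_x else points_y   -- (points_x, points_y)[split_axis]
  let oth := if other_axis = 0 then points_x else points_y   -- (points_x, points_y)[other_axis]
  let median : Nat := src.length / 2
  match src[median]? with
  | none => (0, [], [], [], [])             -- IndexError on an empty list: excluded by Pre_
  | some sp =>
    let key := (pvCoord sp split_axis, pvCoord sp other_axis)
    -- (p[sa], p[oa]) >= key : Python's lexicographic tuple comparison
    let goesRight : (Int × Int) → Bool := fun p =>
      decide (pvCoord p split_axis > key.1) ||
      (pvCoord p split_axis == key.1 && decide (pvCoord p other_axis ≥ key.2))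
    -- stable sort on the boolean key: left points first (in order), then right points
    let ordered := PySem.List.sorted oth goesRight
    -- n_left = sum((p[sa], p[oa]) < key for p in oth): sum of booleans is an int
    let n_left : Int := (oth.map (fun p =>
      if decide (pvCoord p split_axis < key.1) ||
         (pvCoord p split_axis == key.1 && decide (pvCoord p other_axis < key.2)) then (1 : Int) else 0)).sum
    (key.1, src.take median, src.drop median,
      PySem.List.slice ordered none (some n_left),   -- ordered[:n_left]
      PySem.List.slice ordered (some n_left) none)   -- ordered[n_left:]

-- ===== PRECONDITION & SPEC =====
-- Pre_ excludes exactly where A raises: the assert (split_axis ∉ {0,1}) and the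
-- IndexError taking the median of an empty split-axis list.
def Pre_split_points_list (points_x : List (Int × Int)) (points_y : List (Int × Int)) (split_axis : Int) : Prop :=
  (split_axis = 0 ∨ split_axis = 1) ∧ (if split_axis = 0 then points_x else points_y) ≠ []
instance (points_x : List (Int × Int)) (points_y : List (Int × Int)) (split_axis : Int) : Decidable (Pre_split_points_list points_x points_y split_axis) := by unfold Pre_split_points_list; infer_instance
def pvWitness_split_points_list : (List (Int × Int)) × (List (Int × Int)) × Int := ([(1, 2), (3, 4)], [(3, 4), (1, 2)], 0)

def Spec_split_points_list (points_x : List (Int × Int)) (points_y : List (Int × Int)) (split_axis : Int) (out : Int × (List (Int × Int)) × (List (Int × Int)) × (List (Int × Int)) × (List (Int × Int))) : Prop := out = split_points_list_alt points_x points_y split_axis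
instance (points_x : List (Int × Int)) (points_y : List (Int × Int)) (split_axis : Int) (out : Int × (List (Int × Int)) × (List (Int × Int)) × (List (Int × Int)) × (List (Int × Int))) : Decidable (Spec_split_points_list points_x points_y split_axis out) := by unfold Spec_split_points_list; infer_instance

-- ===== CLAIM (what is proved, stated in full; the proofs are below) =====
def Claim_equal_split_points_list : Prop := ∀ (points_x : List (Int × Int)) (points_y : List (Int × Int)) (split_axis : Int), Dom_split_points_list points_x points_y split_axis → Pre_split_points_list points_x points_y split_axis → Spec_split_points_list points_x points_y split_axis (split_points_list points_x points_y split_axis)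

-- ===== LEMMAS AND PROOFS =====

-- Inserting a "false" element into (falses ++ trues) lands at the end of the false block.
theorem pv_insertBy_false {α : Type} (f : α → Bool) (x : α) (hx : f x = false)
    (A B : List α) (hA : ∀ a ∈ A, f a = false) (hB : ∀ b ∈ B, f b = true) :
    PySem.List.insertBy (fun a b => decide (f a < f b)) x (A ++ B) = A ++ x :: B := by
  induction A with
  | nil =>
    cases B with
    | nil => simp [PySem.List.insertBy]
    | cons b bs => simp [PySem.List.insertBy, hx, hB b (by simp)]
  | cons a as ih =>
    have ha : f a = false := hA a (by simp)
    simp only [List.cons_append, PySem.List.insertBy, hx, ha]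
    simp [ih (fun a' ha' => hA a' (by simp [ha']))]

-- Inserting a "true" element lands at the very end (nothing is greater than true).
theorem pv_insertBy_true {α : Type} (f : α → Bool) (x : α) (hx : f x = true) (l : List α) :
    PySem.List.insertBy (fun a b => decide (f a < f b)) x l = l ++ [x] := by
  apply PySem.List.insertBy_of_forall_not_before
  intro y _
  simp [hx]

-- Invariant of the stable insertion-sort fold on a boolean key.
theorem pv_foldl_insert_bool {α : Type} (f : α → Bool) (l : List α) (A B : List α)
    (hA : ∀ a ∈ A, f a = false) (hB : ∀ b ∈ B, f b = true) :
    l.foldl (fun acc x => PySem.List.insertBy (fun a b => decide (f a < f b)) x acc) (A ++ B)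
      = (A ++ l.filter (fun p => !f p)) ++ (B ++ l.filter f) := by
  induction l generalizing A B with
  | nil => simp
  | cons x t ih =>
    by_cases hx : f x = true
    · have hB' : ∀ b ∈ B ++ [x], f b = true := by
        intro b hb
        rcases List.mem_append.mp hb with h | h
        · exact hB b h
        · rw [List.mem_singleton] at h; subst h; exact hx
      rw [List.foldl_cons, pv_insertBy_true f x hx, List.append_assoc, ih A (B ++ [x]) hA hB']
      simp [hx]
    · have hx' : f x = false := by simpa using hx
      have hA' : ∀ a ∈ A ++ [x], f a = false := by
        intro a ha
        rcases List.mem_append.mp ha with h | h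
        · exact hA a h
        · rw [List.mem_singleton] at h; subst h; exact hx'
      rw [List.foldl_cons, pv_insertBy_false f x hx' A B hA hB,
        show A ++ x :: B = (A ++ [x]) ++ B by simp, ih (A ++ [x]) B hA' hB]
      simp [hx']

-- sorted on a boolean key = stable partition: falses (in order) ++ trues (in order).
theorem pv_sorted_bool {α : Type} (f : α → Bool) (l : List α) :
    PySem.List.sorted l f = l.filter (fun p => !f p) ++ l.filter f := by
  rw [PySem.List.sorted_eq_foldl_insertBy]
  simpa using pv_foldl_insert_bool f l [] [] (by simp) (by simp)

-- A's left-bucket predicate is the negation of the right-bucket ("goes right") predicate.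
theorem pv_pred_neg (a b k1 k2 : Int) :
    (decide (a < k1) || (a == k1 && decide (b < k2)))
      = !(decide (a > k1) || (a == k1 && decide (b ≥ k2))) := by
  rcases lt_trichotomy a k1 with h | rfl | h
  · simp [h, ne_of_lt h, not_lt_of_gt h]
  · by_cases hb : b < k2
    · simp [hb, not_le.mpr hb]
    · simp [hb, not_lt.mp hb]
  · simp [h, (ne_of_lt h).symm, not_lt_of_gt h]

-- The 0/1 sum counts the left bucket, and slicing the partitioned list there recovers both filters.
theorem pv_slices {α : Type} (o : List α) (g : α → Bool)
    (n : Int) (hn : n = (o.map (fun p => if !g p then (1 : Int) else 0)).sum) :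
    PySem.List.slice (o.filter (fun p => !g p) ++ o.filter g) none (some n)
        = o.filter (fun p => !g p) ∧
    PySem.List.slice (o.filter (fun p => !g p) ++ o.filter g) (some n) none
        = o.filter g := by
  have hcount : n = ((o.filter (fun p => !g p)).length : Int) := by
    rw [hn, PySem.List.sum_map_ite_one_zero]
    simp [List.countP_eq_length_filter]
  subst hcount
  constructor
  · rw [PySem.List.slice_to_natCast, List.take_left]
  · rw [PySem.List.slice_from_natCast, List.drop_left]

-- ===== VERDICT (by name: the statement is the Claim_ definition above) =====
theorem split_points_list_spec : Claim_equal_split_points_list := by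
  intro px py ax _ hpre
  obtain ⟨hax, hne⟩ := hpre
  unfold Spec_split_points_list split_points_list split_points_list_alt
  rcases hax with rfl | rfl
  · simp only [reduceIte, Int.sub_zero] at hne ⊢
    rw [if_neg (by decide : ¬((1:Int) = 0))]
    cases px[px.length / 2]? with
    | none => rfl
    | some sp =>
      simp only []
      rw [pv_sorted_bool (fun p =>
        decide (pvCoord p 0 > pvCoord sp 0) ||
        (pvCoord p 0 == pvCoord sp 0 && decide (pvCoord p 1 ≥ pvCoord sp 1))) py]
      simp only [pv_pred_neg]
      obtain ⟨h1, h2⟩ := pv_slices py (fun p =>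
        decide (pvCoord p 0 > pvCoord sp 0) ||
        (pvCoord p 0 == pvCoord sp 0 && decide (pvCoord p 1 ≥ pvCoord sp 1))) _ rfl
      rw [h1, h2]
  · simp only [reduceIte, Int.sub_self, one_ne_zero] at hne ⊢
    cases py[py.length / 2]? with
    | none => rfl
    | some sp =>
      simp only []
      rw [pv_sorted_bool (fun p =>
        decide (pvCoord p 1 > pvCoord sp 1) ||
        (pvCoord p 1 == pvCoord sp 1 && decide (pvCoord p 0 ≥ pvCoord sp 0))) px]
      simp only [pv_pred_neg]
      obtain ⟨h1, h2⟩ := pv_slices px (fun p =>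
        decide (pvCoord p 1 > pvCoord sp 1) ||
        (pvCoord p 1 == pvCoord sp 1 && decide (pvCoord p 0 ≥ pvCoord sp 0))) _ rfl
      rw [h1, h2]
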